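-- pv_equiv track=rewrite | github.com/KOlCIqwq/Algoritms-and-Data-Structure | 12RepeatedString.py | rep
-- ===== SOURCE A (Python) =====
-- def rep(s):
--     '''
--     1. We gonna init an array called borderLength in which we count the maxlenght of
--        a border in that position. A border is a substring that is prefix and suffix
--     2. Loop the string, each time we compare the current and the previous, the previous
--        is not i - 1 but rather we need to extract that from the borderLength
--     3. If they're not equal we gonna check if the border's corrisponding position corrispond.
--     4. If both case fail, we gonna decrement till we find a new char that is equal to the current
--        and set the found position and current as the max length border
--
--     e.g.:
--     s = "abcabcab"
--     1I: i=1, s[1]=b, s[1]!=s[0] -> no border, bL[1] = 0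
--     2I: i=2, s[2]=c, s[2]!=s[0](0 from bL[1]) -> no border, bL[2]=0
--     3I: i=3, s[3]=a, s[3]=s[0] -> possible border found, bL[3]=prev+1=1
--     4I: i=4, s[4]=b, s[4]=s[1](1 from bL[3]) -> border corrispond, bL[4]=prev+1=2
--     and so on... at the end we gonna find bL = [0,0,0,1,2,3,4,5] which represents the
--     max length of border in each prefix. We return the n - maxLength of border.
--
--     The runtime will be O(n), n represents the length of s. We loop once the string.
--     The nested while won't change the runtime, because the prev will be at max n,
--     and the prev will never overpass the substring already iterated (bacause it takes
--     only values at borderLength), so it won't affect the overall runtime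
--     '''
--     n = len(s)
--     borderLength = [0] * n
--
--     for i in range(1,n):
--         prev = borderLength[i - 1]
--         while prev > 0 and s[i] != s[prev]:
--             prev = borderLength[prev - 1]
--         if s[i] == s[prev]:
--             prev += 1
--         borderLength[i] = prev
--
--     return n - borderLength[-1]
-- ===== SOURCE B (Python) =====
-- def rep(s):
--     # Smallest period: the least p >= 1 with s[p:] == s[:len(s)-p].
--     # The cheap first-character test skips almost all candidate periods.
--     n = len(s)
--     for p in range(1, n):
--         if s[p] == s[0] and s[p:] == s[:n - p]:
--             return p
--     return n
-- ===== Notes on version B (the rewrite author's own statement) =====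
-- stated objective: simpler
-- what changed: Replaces the KMP failure-function automaton (border array with amortized jump pointer) by a direct smallest-period scan: return the least p >= 1 with s[p:] == s[:n-p], which equals n minus the longest proper border.
import Mathlib
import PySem

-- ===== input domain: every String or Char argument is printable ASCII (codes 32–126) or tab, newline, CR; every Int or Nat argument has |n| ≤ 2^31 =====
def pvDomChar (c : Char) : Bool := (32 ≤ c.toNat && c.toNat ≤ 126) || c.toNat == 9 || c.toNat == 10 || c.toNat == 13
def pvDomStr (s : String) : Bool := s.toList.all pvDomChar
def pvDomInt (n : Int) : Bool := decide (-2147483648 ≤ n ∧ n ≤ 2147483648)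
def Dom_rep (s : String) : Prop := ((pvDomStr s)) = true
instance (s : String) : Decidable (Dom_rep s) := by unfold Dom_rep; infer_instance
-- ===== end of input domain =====

-- B computes the answer as the smallest period of s by direct slice comparison (simpler,
-- no failure-function automaton); equivalence on nonempty strings (on "" A raises
-- IndexError, excluded by Pre_rep).

-- ===== PORT A =====
-- inner 'while prev > 0 and s[i] != s[prev]' loop; fuel = initial prev is enough, since
-- each stored border length is below its index, so prev strictly decreases.
def repJmp (t : List Char) (bl : List Nat) (c : Char) : Nat → Nat → Nat
  | 0, prev => prev
  | f + 1, prev =>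
    if prev ≠ 0 ∧ t.getD prev ' ' ≠ c then repJmp t bl c f (bl.getD (prev - 1) 0) else prev

-- 'for i in range(1, n)' filling borderLength
def repGo (t : List Char) (bl : List Nat) (i : Nat) : List Nat :=
  if _h : i < t.length then
    let prev0 := bl.getD (i - 1) 0
    let prev1 := repJmp t bl (t.getD i ' ') prev0 prev0
    let prev2 := if t.getD i ' ' = t.getD prev1 ' ' then prev1 + 1 else prev1
    repGo t (bl.set i prev2) (i + 1)
  else bl
termination_by t.length - i

def rep (s : String) : Int :=
  let t := s.toList
  let n := t.length
  let bl := repGo t (List.replicate n 0) 1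
  -- borderLength[-1]; Python raises IndexError on the empty string, excluded by Pre_rep
  (n : Int) - (((PySem.List.pyGet? bl (-1)).getD 0 : Nat) : Int)

-- ===== PORT B =====
-- 'for p in range(1, n): if s[p] == s[0] and s[p:] == s[:n-p]: return p' ; 'return n'.
-- s[p], s[0] are in range for 1 ≤ p < n; the slices s[p:], s[:n-p] are exactly
-- t.drop p, t.take (n-p) for 0 ≤ p ≤ n.
def altGo (t : List Char) (p : Nat) : Int :=
  if _h : p < t.length then
    if t.getD p ' ' = t.getD 0 ' ' ∧ t.drop p = t.take (t.length - p) then (p : Int)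
    else altGo t (p + 1)
  else (t.length : Int)
termination_by t.length - p

def rep_alt (s : String) : Int := altGo s.toList 1

-- ===== PRECONDITION & SPEC =====
-- Pre_rep excludes only the empty string, on which A raises IndexError (borderLength[-1]).
def Pre_rep (s : String) : Prop := s ≠ ""
instance (s : String) : Decidable (Pre_rep s) := by unfold Pre_rep; infer_instance
def pvWitness_rep : String := "abcabcab"

def Spec_rep (s : String) (out : Int) : Prop := out = rep_alt s
instance (s : String) (out : Int) : Decidable (Spec_rep s out) := by unfold Spec_rep; infer_instance

-- ===== CLAIM (what is proved, stated in full; the proofs are below) =====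
def Claim_equal_rep : Prop := ∀ (s : String), Dom_rep s → Pre_rep s → Spec_rep s (rep s)

-- ===== LEMMAS AND PROOFS =====

-- k is a border of the length-m prefix of t: the k-prefix equals the k-suffix of t.take m.
abbrev Bor (t : List Char) (m k : Nat) : Prop := t.take k = (t.take m).drop (m - k)

-- length of the longest proper border of t.take m
def Bp (t : List Char) (m : Nat) : Nat := Nat.findGreatest (fun k => Bor t m k) (m - 1)

theorem bor_zero (t : List Char) (m : Nat) : Bor t m 0 := by
  simp [Bor, List.drop_eq_nil_iff]

theorem Bp_le (t : List Char) (m : Nat) : Bp t m ≤ m - 1 := Nat.findGreatest_le _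

theorem Bp_bor (t : List Char) (m : Nat) : Bor t m (Bp t m) :=
  Nat.findGreatest_spec (Nat.zero_le _) (bor_zero t m)

theorem Bp_max (t : List Char) (m k : Nat) (h1 : Bp t m < k) (h2 : k ≤ m - 1) :
    ¬ Bor t m k := Nat.findGreatest_is_greatest h1 h2

theorem bor_trans_iff (t : List Char) (m k k' : Nat) (hk : Bor t m k) (h1 : k' ≤ k)
    (h2 : k ≤ m) : (Bor t m k' ↔ Bor t k k') := by
  unfold Bor
  rw [show m - k' = (m - k) + (k - k') by omega, ← List.drop_drop, ← hk]

theorem bor_succ_iff (t : List Char) (i k : Nat) (hi : i < t.length) (hk : k ≤ i) :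
    (Bor t (i + 1) (k + 1) ↔ (Bor t i k ∧ t.getD i ' ' = t.getD k ' ')) := by
  have hki : k < t.length := lt_of_le_of_lt hk hi
  have h1 : t.take (k + 1) = t.take k ++ [t.getD k ' '] := by
    rw [List.take_succ, List.getElem?_eq_getElem hki, List.getD_eq_getElem?_getD,
      List.getElem?_eq_getElem hki]
    rfl
  have h2 : t.take (i + 1) = t.take i ++ [t.getD i ' '] := by
    rw [List.take_succ, List.getElem?_eq_getElem hi, List.getD_eq_getElem?_getD,
      List.getElem?_eq_getElem hi]
    rfl
  have hlen : i - k ≤ (t.take i).length := by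
    simp [List.length_take]; omega
  constructor
  · intro h
    unfold Bor at h
    rw [h1, h2, show i + 1 - (k + 1) = i - k by omega,
      List.drop_append_of_le_length hlen] at h
    have := List.append_inj' h (by simp)
    exact ⟨this.1, by have h2 := this.2; simpa using h2.symm⟩
  · rintro ⟨hb, hc⟩
    unfold Bor
    rw [h1, h2, show i + 1 - (k + 1) = i - k by omega,
      List.drop_append_of_le_length hlen, hb, hc]

theorem Bp_one (t : List Char) : Bp t 1 = 0 := by
  simp [Bp]

-- correctness of the inner while loop
theorem repJmp_spec (t : List Char) (bl : List Nat) (i : Nat) (hi1 : 1 ≤ i)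
    (hi : i < t.length)
    (hbl : ∀ j, j < i → bl.getD j 0 = Bp t (j + 1)) :
    ∀ fuel prev, prev ≤ fuel → Bor t i prev → prev < i →
    (∀ k', prev < k' → k' < i → Bor t i k' → t.getD k' ' ' ≠ t.getD i ' ') →
    (Bor t i (repJmp t bl (t.getD i ' ') fuel prev) ∧
     repJmp t bl (t.getD i ' ') fuel prev < i ∧
     (∀ k', repJmp t bl (t.getD i ' ') fuel prev < k' → k' < i → Bor t i k' →
        t.getD k' ' ' ≠ t.getD i ' ') ∧
     (repJmp t bl (t.getD i ' ') fuel prev = 0 ∨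
        t.getD (repJmp t bl (t.getD i ' ') fuel prev) ' ' = t.getD i ' ')) := by
  intro fuel
  induction fuel with
  | zero =>
    intro prev hle hb hlt hinv
    have : prev = 0 := Nat.le_zero.mp hle
    subst this
    exact ⟨hb, hlt, hinv, Or.inl rfl⟩
  | succ f ih =>
    intro prev hle hb hlt hinv
    by_cases hcond : prev ≠ 0 ∧ t.getD prev ' ' ≠ t.getD i ' '
    · rw [repJmp, if_pos hcond]
      have hprev1 : 1 ≤ prev := Nat.one_le_iff_ne_zero.mpr hcond.1
      have hblv : bl.getD (prev - 1) 0 = Bp t prev := by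
        have := hbl (prev - 1) (by omega)
        rwa [show prev - 1 + 1 = prev by omega] at this
      rw [hblv]
      have hple : Bp t prev ≤ prev - 1 := Bp_le t prev
      apply ih
      · omega
      · exact (bor_trans_iff t i prev (Bp t prev) hb (by omega) (le_of_lt hlt)).mpr
          (Bp_bor t prev)
      · omega
      · intro k' hk1 hk2 hk3
        rcases lt_trichotomy k' prev with h | h | h
        · exfalso
          have : Bor t prev k' := (bor_trans_iff t i prev k' hb (le_of_lt h)
            (le_of_lt hlt)).mp hk3
          exact Bp_max t prev k' hk1 (by omega) this
        · subst h; exact hcond.2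
        · exact hinv k' h hk2 hk3
    · rw [repJmp, if_neg hcond]
      push_neg at hcond
      refine ⟨hb, hlt, hinv, ?_⟩
      by_cases h0 : prev = 0
      · exact Or.inl h0
      · exact Or.inr (hcond h0)

-- the step of the for loop computes the next longest proper border
theorem step_eq (t : List Char) (bl : List Nat) (i : Nat) (hi1 : 1 ≤ i)
    (hi : i < t.length)
    (hbl : ∀ j, j < i → bl.getD j 0 = Bp t (j + 1)) :
    (let prev0 := bl.getD (i - 1) 0
     let prev1 := repJmp t bl (t.getD i ' ') prev0 prev0
     (if t.getD i ' ' = t.getD prev1 ' ' then prev1 + 1 else prev1)) = Bp t (i + 1) := by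
  have hprev0 : bl.getD (i - 1) 0 = Bp t i := by
    have := hbl (i - 1) (by omega)
    rwa [show i - 1 + 1 = i by omega] at this
  have hinv0 : ∀ k', Bp t i < k' → k' < i → Bor t i k' →
      t.getD k' ' ' ≠ t.getD i ' ' := by
    intro k' h1 h2 h3
    exact absurd h3 (Bp_max t i k' h1 (by omega))
  obtain ⟨hb, hlt, hinv, hstop⟩ := repJmp_spec t bl i hi1 hi hbl (bl.getD (i - 1) 0)
    (bl.getD (i - 1) 0) le_rfl (hprev0 ▸ Bp_bor t i)
    (by rw [hprev0]; have := Bp_le t i; omega)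
    (by rw [hprev0]; exact hinv0)
  set r := repJmp t bl (t.getD i ' ') (bl.getD (i - 1) 0) (bl.getD (i - 1) 0) with hr
  show (if t.getD i ' ' = t.getD r ' ' then r + 1 else r) = Bp t (i + 1)
  have hBp : Bp t (i + 1) = Nat.findGreatest (fun k => Bor t (i + 1) k) i := by
    simp [Bp]
  by_cases hc : t.getD i ' ' = t.getD r ' '
  · rw [if_pos hc, hBp]
    symm
    rw [Nat.findGreatest_eq_iff]
    refine ⟨by omega, fun _ => ?_, ?_⟩
    · exact (bor_succ_iff t i r hi (by omega)).mpr ⟨hb, hc⟩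
    · intro k hk1 hk2 hcontra
      obtain ⟨k', rfl⟩ : ∃ k', k = k' + 1 := ⟨k - 1, by omega⟩
      have := (bor_succ_iff t i k' hi (by omega)).mp hcontra
      exact hinv k' (by omega) (by omega) this.1 this.2.symm
  · rw [if_neg hc, hBp]
    have hr0 : r = 0 := by
      rcases hstop with h | h
      · exact h
      · exact absurd h.symm hc
    rw [hr0]
    symm
    rw [Nat.findGreatest_eq_iff]
    refine ⟨Nat.zero_le _, by simp, ?_⟩
    intro k hk1 hk2 hcontra
    obtain ⟨k', rfl⟩ : ∃ k', k = k' + 1 := ⟨k - 1, by omega⟩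
    have hkk := (bor_succ_iff t i k' hi (by omega)).mp hcontra
    by_cases h0 : k' = 0
    · subst h0
      rw [hr0] at hc
      exact hc hkk.2
    · exact hinv k' (by omega) (by omega) hkk.1 hkk.2.symm

theorem repGo_spec (t : List Char) :
    ∀ d i bl, d = t.length - i → 1 ≤ i → bl.length = t.length →
    (∀ j, j < i → bl.getD j 0 = Bp t (j + 1)) →
    ((repGo t bl i).length = t.length ∧
      ∀ j, j < t.length → (repGo t bl i).getD j 0 = Bp t (j + 1)) := by
  intro d
  induction d with
  | zero =>
    intro i bl hd hi1 hlen hbl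
    have hge : ¬ i < t.length := by omega
    rw [repGo, dif_neg hge]
    exact ⟨hlen, fun j hj => hbl j (by omega)⟩
  | succ f ih =>
    intro i bl hd hi1 hlen hbl
    have hlt : i < t.length := by omega
    rw [repGo, dif_pos hlt]
    have hstep := step_eq t bl i hi1 hlt hbl
    simp only at hstep
    set v := (if t.getD i ' ' = t.getD (repJmp t bl (t.getD i ' ') (bl.getD (i - 1) 0)
      (bl.getD (i - 1) 0)) ' ' then repJmp t bl (t.getD i ' ') (bl.getD (i - 1) 0)
      (bl.getD (i - 1) 0) + 1 else repJmp t bl (t.getD i ' ') (bl.getD (i - 1) 0)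
      (bl.getD (i - 1) 0)) with hv
    apply ih (i + 1) (bl.set i v) (by omega) (by omega) (by simpa using hlen)
    intro j hj
    by_cases hji : j = i
    · subst hji
      rw [List.getD_eq_getElem?_getD, List.getElem?_set_self (by omega)]
      simpa using hstep
    · rw [List.getD_eq_getElem?_getD, List.getElem?_set_ne (by omega),
        ← List.getD_eq_getElem?_getD]
      exact hbl j (by omega)

-- the first-character guard is implied by the slice equality, so the guarded test
-- is equivalent to the plain one
theorem head_eq_of_period (t : List Char) (p : Nat) (hp : p < t.length)
    (hb : t.drop p = t.take (t.length - p)) : t.getD p ' ' = t.getD 0 ' ' := by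
  have h := congrArg List.head? hb
  rw [List.head?_drop, List.head?_take] at h
  rw [if_neg (by omega : ¬ t.length - p = 0)] at h
  rw [List.getD_eq_getElem?_getD, List.getD_eq_getElem?_getD, h, List.head?_eq_getElem?]

theorem altGo_eq (t : List Char) :
    ∀ d p, d = t.length - p → 1 ≤ p → p ≤ t.length →
    altGo t p = (t.length : Int) -
      (Nat.findGreatest (fun k => Bor t t.length k) (t.length - p) : Int) := by
  intro d
  induction d with
  | zero =>
    intro p hd h1 h2
    have hp : p = t.length := by omega
    rw [altGo, dif_neg (by omega)]
    rw [show t.length - p = 0 by omega]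
    simp
  | succ f ih =>
    intro p hd h1 h2
    have hlt : p < t.length := by omega
    rw [altGo, dif_pos hlt]
    have hcond : (t.getD p ' ' = t.getD 0 ' ' ∧ t.drop p = t.take (t.length - p)) ↔
        Bor t t.length (t.length - p) := by
      have hplain : (t.drop p = t.take (t.length - p)) ↔
          Bor t t.length (t.length - p) := by
        unfold Bor
        rw [List.take_length, show t.length - (t.length - p) = p by omega]
        exact eq_comm
      constructor
      · exact fun h => hplain.mp h.2
      · exact fun h => ⟨head_eq_of_period t p hlt (hplain.mpr h), hplain.mpr h⟩
    have hsucc : t.length - p = (t.length - (p + 1)) + 1 := by omega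
    by_cases hb : t.getD p ' ' = t.getD 0 ' ' ∧ t.drop p = t.take (t.length - p)
    · rw [if_pos hb]
      rw [hsucc, Nat.findGreatest_succ,
        if_pos (by rw [← hsucc]; exact hcond.mp hb)]
      rw [← hsucc]
      have : ((t.length - p : Nat) : Int) = (t.length : Int) - (p : Int) := by
        omega
      rw [this]; ring
    · rw [if_neg hb]
      rw [hsucc, Nat.findGreatest_succ, if_neg (by rw [← hsucc]; exact fun h => hb (hcond.mpr h))]
      exact ih (p + 1) (by omega) (by omega) (by omega)

theorem toList_ne_nil_of_ne_empty (s : String) (h : s ≠ "") : s.toList ≠ [] := by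
  intro hnil
  apply h
  have := congrArg String.ofList hnil
  simpa using this

-- ===== VERDICT (by name: the statement is the Claim_ definition above) =====
theorem rep_spec : Claim_equal_rep := by
  intro s _hdom hpre
  simp only [Spec_rep, rep, rep_alt]
  have htne : s.toList ≠ [] := toList_ne_nil_of_ne_empty s hpre
  set t := s.toList with ht
  have hn1 : 1 ≤ t.length := List.length_pos_of_ne_nil htne
  obtain ⟨hlen, hall⟩ := repGo_spec t (t.length - 1) 1 (List.replicate t.length 0)
    rfl le_rfl (by simp) (by intro j hj; interval_cases j; simp [Bp_one, List.getD])
  set bl := repGo t (List.replicate t.length 0) 1 with hbl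
  have hblne : bl ≠ [] := by
    intro h
    rw [h] at hlen
    simp at hlen
    omega
  have hlast : PySem.List.pyGet? bl (-1) = some (bl.getD (t.length - 1) 0) := by
    rw [PySem.List.pyGet?_neg_one, List.getLast?_eq_getElem?]
    rw [List.getD_eq_getElem?_getD, hlen,
      List.getElem?_eq_getElem (by omega : t.length - 1 < bl.length)]
    simp
  rw [hlast]
  simp only [Option.getD_some]
  rw [hall (t.length - 1) (by omega), show t.length - 1 + 1 = t.length by omega]
  rw [altGo_eq t (t.length - 1) 1 rfl le_rfl hn1]
  unfold Bp
  rfl
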